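-- pv_equiv track=rewrite | github.com/tud-ccc/mocasin | mocasin/platforms/topologies.py | meshTopology
-- ===== SOURCE A (Python) =====
-- import math
--
-- def meshTopology(elementList):
--     """Creates a the adjacency list for a mesh topology out of a linear
--     list of all elements in the network. A mesh topology is a regular
--     rectangular structure where every element except the border elements has
--     exactly four neigbors (N,E,S,W). Number of elements must be a square.
--     :param list[string] elementList: A list of all elements in the network.
--     """
--     n_squared = len(elementList)
--     n = math.sqrt(n_squared)
--     assert n.is_integer()
--     n = int(n)
--     adjacencyList = {}
--     for x in range(n):
--         for y in range(n):
--             adjacent = []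
--             if x % n != 0:
--                 adjacent.append(elementList[y * n + (x - 1)])
--             if x % n != (n - 1):
--                 adjacent.append(elementList[y * n + (x + 1)])
--             if y % n != 0:
--                 adjacent.append(elementList[(y - 1) * n + x])
--             if y % n != (n - 1):
--                 adjacent.append(elementList[(y + 1) * n + x])
--             adjacencyList.update({elementList[y * n + x]: adjacent})
--     return adjacencyList
-- ===== SOURCE B (Python) =====
-- import math
--
--
-- def meshTopology(elementList):
--     """Builds the mesh adjacency dict by iterating over the grid's edges
--     (a horizontal pass, then a vertical pass), accumulating each cell's
--     neighbours in a flat-index array, and building the dict at the end."""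
--     n_squared = len(elementList)
--     n = math.sqrt(n_squared)
--     assert n.is_integer()
--     n = int(n)
--     # neighbour lists per flat cell index, filled edge by edge
--     adj = [[] for _ in range(n_squared)]
--     for x in range(n - 1):  # horizontal edges in increasing x: W arrives before E
--         for y in range(n):
--             i = y * n + x
--             adj[i].append(elementList[i + 1])
--             adj[i + 1].append(elementList[i])
--     for y in range(n - 1):  # vertical edges in increasing y: N before S (after W, E)
--         for x in range(n):
--             i = y * n + x
--             adj[i].append(elementList[i + n])
--             adj[i + n].append(elementList[i])
--     return {elementList[y * n + x]: adj[y * n + x] for x in range(n) for y in range(n)}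
-- ===== Notes on version B (the rewrite author's own statement) =====
-- stated objective: alternative
-- what changed: Instead of computing the four neighbour candidates per cell, B fills a flat-index array of neighbour lists by iterating over the grid's edges (a horizontal pass in increasing x, then a vertical pass in increasing y, which reproduces A's exact W,E,N,S per-cell order) and only then builds the dict in one comprehension.
import Mathlib
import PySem

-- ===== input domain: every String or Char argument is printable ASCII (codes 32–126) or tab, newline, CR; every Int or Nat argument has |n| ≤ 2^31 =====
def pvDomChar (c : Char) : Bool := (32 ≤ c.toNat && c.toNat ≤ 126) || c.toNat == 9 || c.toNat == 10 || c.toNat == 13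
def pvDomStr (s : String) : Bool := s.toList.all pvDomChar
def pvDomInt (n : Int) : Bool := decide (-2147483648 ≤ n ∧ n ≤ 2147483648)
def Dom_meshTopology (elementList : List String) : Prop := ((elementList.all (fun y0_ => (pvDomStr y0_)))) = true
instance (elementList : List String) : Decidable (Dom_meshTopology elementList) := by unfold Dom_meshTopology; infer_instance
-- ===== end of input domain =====

-- B replaces A's per-cell computation of the four neighbour candidates by an edge-pass construction
-- (fill a flat-index array of neighbour lists by a horizontal and a vertical edge sweep, then build
-- the dict in one comprehension); same cost, alternative decomposition.


-- ===== PORT A =====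
-- n = math.sqrt(len); assert n.is_integer(); n = int(n): exact as Nat.sqrt on perfect-square lengths;
-- a failing assert (non-square length) raises AssertionError and is excluded by Pre_.  Under Pre_
-- every index y*n+x that a taken branch computes is in range, so List.getD is exact for elementList[...].
def meshTopology (elementList : List String) : List (String × List String) :=
  let n := Nat.sqrt elementList.length
  let adjacencyList : PySem.Dict String (List String) :=
    (List.range n).foldl (fun d x =>
      (List.range n).foldl (fun d y =>
        let adjacent : List String := []
        let adjacent := if x % n ≠ 0 then adjacent ++ [elementList.getD (y * n + (x - 1)) ""] else adjacent
        let adjacent := if x % n ≠ n - 1 then adjacent ++ [elementList.getD (y * n + (x + 1)) ""] else adjacent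
        let adjacent := if y % n ≠ 0 then adjacent ++ [elementList.getD ((y - 1) * n + x) ""] else adjacent
        let adjacent := if y % n ≠ n - 1 then adjacent ++ [elementList.getD ((y + 1) * n + x) ""] else adjacent
        d.insert (elementList.getD (y * n + x) "") adjacent) d)
      PySem.Dict.empty
  adjacencyList.items

-- ===== PORT B =====
-- transliteration of Source B: a flat-index array of neighbour lists (adj[i].append(w) is
-- List.modify i (· ++ [w]); every touched index is in range under Pre_, so no IndexError arises),
-- filled by the horizontal then the vertical edge pass, then the closing dict comprehension.
def meshTopology_alt (elementList : List String) : List (String × List String) :=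
  let n := Nat.sqrt elementList.length
  let adj : List (List String) := List.replicate elementList.length []
  let adj := (List.range (n - 1)).foldl (fun a x =>
    (List.range n).foldl (fun a y =>
      let i := y * n + x
      let a := a.modify i (fun l => l ++ [elementList.getD (i + 1) ""])
      a.modify (i + 1) (fun l => l ++ [elementList.getD i ""])) a) adj
  let adj := (List.range (n - 1)).foldl (fun a y =>
    (List.range n).foldl (fun a x =>
      let i := y * n + x
      let a := a.modify i (fun l => l ++ [elementList.getD (i + n) ""])
      a.modify (i + n) (fun l => l ++ [elementList.getD i ""])) a) adj
  ((List.range n).foldl (fun d x =>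
    (List.range n).foldl (fun d y =>
      d.insert (elementList.getD (y * n + x) "") (adj.getD (y * n + x) [])) d)
    PySem.Dict.empty).items

-- ===== PRECONDITION & SPEC =====
-- Pre_ excludes exactly the non-square lengths, on which A's assert raises AssertionError.
def Pre_meshTopology (elementList : List String) : Prop :=
  ∃ m, m ≤ elementList.length ∧ m * m = elementList.length
instance (elementList : List String) : Decidable (Pre_meshTopology elementList) := by
  unfold Pre_meshTopology; infer_instance

def pvWitness_meshTopology : List String := ["a", "b", "c", "d"]

def Spec_meshTopology (elementList : List String) (out : List (String × List String)) : Prop := out = meshTopology_alt elementList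
instance (elementList : List String) (out : List (String × List String)) : Decidable (Spec_meshTopology elementList out) := by unfold Spec_meshTopology; infer_instance

-- ===== CLAIM (what is proved, stated in full; the proofs are below) =====
def Claim_equal_meshTopology : Prop := ∀ (elementList : List String), Dom_meshTopology elementList → Pre_meshTopology elementList → Spec_meshTopology elementList (meshTopology elementList)

-- ===== LEMMAS AND PROOFS =====

-- one occupied slot in a range-indexed flatMap
theorem pv_flatMap_slot {α : Type} (m a : Nat) (u : List α) :
    (List.range m).flatMap (fun x => if x = a then u else []) = if a < m then u else [] := by
  induction m with
  | zero => simp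
  | succ m ih =>
    rw [List.range_succ, List.flatMap_append, ih]
    by_cases h1 : a < m <;> by_cases h2 : m = a <;> simp [h1, h2] <;> omega

-- the two slots x = a (contributing u) and x + 1 = a (contributing v) of one sweep
theorem pv_flatMap_slots {α : Type} (k a : Nat) (u v : List α) (ha : a < k + 1) :
    (List.range k).flatMap (fun x => (if x = a then u else []) ++ (if x + 1 = a then v else []))
      = (if a ≠ 0 then v else []) ++ (if a ≠ k then u else []) := by
  induction k with
  | zero =>
    interval_cases a
    simp
  | succ k ih =>
    rw [List.range_succ, List.flatMap_append]
    by_cases hk : a < k + 1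
    · rw [ih hk]
      rcases Nat.lt_or_ge a k with h | h
      · have h1 : ¬ (k = a) := by omega
        have h2 : ¬ (k + 1 = a) := by omega
        have h3 : a ≠ k := by omega
        have h4 : a ≠ k + 1 := by omega
        simp [h1, h2, h3, h4]
      · have hak : a = k := by omega
        subst hak
        have h4 : a ≠ a + 1 := by omega
        simp [h4]
    · -- a = k + 1 : only the x + 1 = a slot fires, at x = k
      have hak : a = k + 1 := by omega
      subst hak
      have hcong : ∀ x ∈ List.range k,
          ((if x = k + 1 then u else []) ++ (if x + 1 = k + 1 then v else []) : List α) = [] := by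
        intro x hx
        have : x < k := List.mem_range.mp hx
        have h1 : ¬ (x = k + 1) := by omega
        have h2 : ¬ (x = k) := by omega
        simp [h1, h2]
      rw [List.flatMap_congr hcong]
      simp

-- coordinates below n are recovered from the flat index
theorem pv_coord_inj (n x x' y y' : Nat) (hx : x < n) (hx' : x' < n)
    (h : y * n + x = y' * n + x') : x = x' ∧ y = y' := by
  have hxx : x = x' := by
    have h1 : (y * n + x) % n = x := by
      rw [Nat.mul_comm, Nat.mul_add_mod]
      exact Nat.mod_eq_of_lt hx
    have h2 : (y' * n + x') % n = x' := by
      rw [Nat.mul_comm, Nat.mul_add_mod]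
      exact Nat.mod_eq_of_lt hx'
    rw [h, h2] at h1; omega
  subst hxx
  refine ⟨rfl, ?_⟩
  have hn : 0 < n := by omega
  have : y * n = y' * n := by omega
  exact Nat.eq_of_mul_eq_mul_right hn this

theorem pv_idx_eq_iff (n x x' y y' : Nat) (hx : x < n) (hx' : x' < n) :
    y * n + x = y' * n + x' ↔ (x = x' ∧ y = y') := by
  constructor
  · exact pv_coord_inj n x x' y y' hx hx'
  · rintro ⟨rfl, rfl⟩; rfl

-- flat index of a cell is in range
theorem pv_idx_lt (n x y len : Nat) (hlen : n * n = len) (hx : x < n) (hy : y < n) :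
    y * n + x < len := by
  have hsm : (y + 1) * n = y * n + n := by ring
  have h2 : (y + 1) * n ≤ n * n := Nat.mul_le_mul_right n (by omega)
  omega

-- conditional append, normalized ("adjacent.append(w) under a guard")
theorem pv_ifapp (c : Prop) [Decidable c] (l : List String) (w : String) :
    (if c then l ++ [w] else l) = l ++ (if c then [w] else []) := by
  split <;> simp

-- the horizontal edge pass of B, flattened to one (index, appended element) op per append
def pvOpsH (L : List String) (n : Nat) : List (Nat × String) :=
  (List.range (n - 1)).flatMap (fun x => (List.range n).flatMap (fun y =>
    [(y * n + x, L.getD (y * n + x + 1) ""),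
     (y * n + x + 1, L.getD (y * n + x) "")]))

-- the vertical edge pass of B, flattened likewise
def pvOpsV (L : List String) (n : Nat) : List (Nat × String) :=
  (List.range (n - 1)).flatMap (fun y => (List.range n).flatMap (fun x =>
    [(y * n + x, L.getD (y * n + x + n) ""),
     (y * n + x + n, L.getD (y * n + x) "")]))

-- an append-at-index pass preserves the array length
theorem pv_arr_len (ops : List (Nat × String)) (arr : List (List String)) :
    (ops.foldl (fun a p => a.modify p.1 (fun l => l ++ [p.2])) arr).length = arr.length := by
  induction ops generalizing arr with
  | nil => rfl
  | cons p ops ih => simp [List.foldl_cons, ih, List.length_modify]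

-- what one in-range entry accumulates over an append-at-index pass
theorem pv_arr_getD (ops : List (Nat × String)) (arr : List (List String)) (j : Nat)
    (hj : j < arr.length) :
    (ops.foldl (fun a p => a.modify p.1 (fun l => l ++ [p.2])) arr).getD j []
      = arr.getD j [] ++ (ops.filter (fun p => p.1 == j)).map (fun p => p.2) := by
  induction ops generalizing arr with
  | nil => simp
  | cons p ops ih =>
    rw [List.foldl_cons, ih (arr.modify p.1 (fun l => l ++ [p.2])) (by rw [List.length_modify]; exact hj)]
    have hmod : (arr.modify p.1 (fun l => l ++ [p.2])).getD j []
        = arr.getD j [] ++ (if p.1 = j then [p.2] else []) := by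
      rw [List.getD_eq_getElem _ _ (by rw [List.length_modify]; exact hj),
          List.getElem_modify _ _ _ _ (by rw [List.length_modify]; exact hj), List.getD_eq_getElem _ _ hj]
      split <;> simp
    rw [hmod, List.filter_cons]
    by_cases hpj : p.1 = j <;> simp [hpj, List.append_assoc]

-- filtered horizontal op list seen by one cell: its W then its E neighbour
theorem pv_filterH (L : List String) (n : Nat)
    (x₀ y₀ : Nat) (hx₀ : x₀ < n) (hy₀ : y₀ < n) :
    (((pvOpsH L n).filter (fun p => p.1 == y₀ * n + x₀)).map (fun p => p.2))
    = (if x₀ ≠ 0 then [L.getD (y₀ * n + (x₀ - 1)) ""] else [])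
      ++ (if x₀ ≠ n - 1 then [L.getD (y₀ * n + (x₀ + 1)) ""] else []) := by
  unfold pvOpsH
  rw [List.filter_flatMap, List.map_flatMap]
  have houter : ∀ x ∈ List.range (n - 1),
      (List.map (fun p => p.2) (List.filter (fun p => p.1 == y₀ * n + x₀)
        ((List.range n).flatMap (fun y =>
          [(y * n + x, L.getD (y * n + x + 1) ""),
           (y * n + x + 1, L.getD (y * n + x) "")]))))
      = (if x = x₀ then [L.getD (y₀ * n + (x₀ + 1)) ""] else [])
        ++ (if x + 1 = x₀ then [L.getD (y₀ * n + (x₀ - 1)) ""] else []) := by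
    intro x hx
    have hxlt : x < n - 1 := List.mem_range.mp hx
    rw [List.filter_flatMap, List.map_flatMap]
    have hinner : ∀ y ∈ List.range n,
        (List.map (fun p => p.2) (List.filter (fun p => p.1 == y₀ * n + x₀)
          [(y * n + x, L.getD (y * n + x + 1) ""),
           (y * n + x + 1, L.getD (y * n + x) "")]))
        = if y = y₀ then
            (if x = x₀ then [L.getD (y₀ * n + (x₀ + 1)) ""] else [])
            ++ (if x + 1 = x₀ then [L.getD (y₀ * n + (x₀ - 1)) ""] else [])
          else [] := by
      intro y hy
      have hylt : y < n := List.mem_range.mp hy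
      have ha : y * n + x + 1 = y * n + (x + 1) := by omega
      rw [List.filter_cons, List.filter_cons, List.filter_nil, ha]
      have e1 : y * n + x = y₀ * n + x₀ ↔ (x = x₀ ∧ y = y₀) :=
        pv_idx_eq_iff n x x₀ y y₀ (by omega) hx₀
      have e2 : y * n + (x + 1) = y₀ * n + x₀ ↔ (x + 1 = x₀ ∧ y = y₀) :=
        pv_idx_eq_iff n (x + 1) x₀ y y₀ (by omega) hx₀
      simp only [beq_iff_eq, e1, e2]
      by_cases hyy : y = y₀ <;> by_cases hxx : x = x₀ <;> by_cases hxx1 : x + 1 = x₀ <;>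
        (try omega) <;>
        simp [hyy, hxx, hxx1] <;> subst_vars <;> (try simp)
    rw [List.flatMap_congr hinner, pv_flatMap_slot n y₀ _]
    simp [hy₀]
  rw [List.flatMap_congr houter]
  exact pv_flatMap_slots (n - 1) x₀ _ _ (by omega)

-- filtered vertical op list seen by one cell: its N then its S neighbour
theorem pv_filterV (L : List String) (n : Nat)
    (x₀ y₀ : Nat) (hx₀ : x₀ < n) (hy₀ : y₀ < n) :
    (((pvOpsV L n).filter (fun p => p.1 == y₀ * n + x₀)).map (fun p => p.2))
    = (if y₀ ≠ 0 then [L.getD ((y₀ - 1) * n + x₀) ""] else [])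
      ++ (if y₀ ≠ n - 1 then [L.getD ((y₀ + 1) * n + x₀) ""] else []) := by
  unfold pvOpsV
  rw [List.filter_flatMap, List.map_flatMap]
  have houter : ∀ y ∈ List.range (n - 1),
      (List.map (fun p => p.2) (List.filter (fun p => p.1 == y₀ * n + x₀)
        ((List.range n).flatMap (fun x =>
          [(y * n + x, L.getD (y * n + x + n) ""),
           (y * n + x + n, L.getD (y * n + x) "")]))))
      = (if y = y₀ then [L.getD ((y₀ + 1) * n + x₀) ""] else [])
        ++ (if y + 1 = y₀ then [L.getD ((y₀ - 1) * n + x₀) ""] else []) := by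
    intro y hy
    have hylt : y < n - 1 := List.mem_range.mp hy
    rw [List.filter_flatMap, List.map_flatMap]
    have hinner : ∀ x ∈ List.range n,
        (List.map (fun p => p.2) (List.filter (fun p => p.1 == y₀ * n + x₀)
          [(y * n + x, L.getD (y * n + x + n) ""),
           (y * n + x + n, L.getD (y * n + x) "")]))
        = if x = x₀ then
            (if y = y₀ then [L.getD ((y₀ + 1) * n + x₀) ""] else [])
            ++ (if y + 1 = y₀ then [L.getD ((y₀ - 1) * n + x₀) ""] else [])
          else [] := by
      intro x hx
      have hxlt : x < n := List.mem_range.mp hx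
      have ha : y * n + x + n = (y + 1) * n + x := by ring
      rw [List.filter_cons, List.filter_cons, List.filter_nil, ha]
      have e1 : y * n + x = y₀ * n + x₀ ↔ (x = x₀ ∧ y = y₀) :=
        pv_idx_eq_iff n x x₀ y y₀ hxlt hx₀
      have e2 : (y + 1) * n + x = y₀ * n + x₀ ↔ (x = x₀ ∧ y + 1 = y₀) :=
        pv_idx_eq_iff n x x₀ (y + 1) y₀ hxlt hx₀
      simp only [beq_iff_eq, e1, e2]
      by_cases hxx : x = x₀ <;> by_cases hyy : y = y₀ <;> by_cases hyy1 : y + 1 = y₀ <;>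
        (try omega) <;>
        simp [hxx, hyy, hyy1] <;> subst_vars <;> (try simp)
    rw [List.flatMap_congr hinner, pv_flatMap_slot n x₀ _]
    simp [hx₀]
  rw [List.flatMap_congr houter]
  exact pv_flatMap_slots (n - 1) y₀ _ _ (by omega)

theorem pv_main (elementList : List String)
    (hPre : Pre_meshTopology elementList) :
    meshTopology elementList = meshTopology_alt elementList := by
  obtain ⟨m, hmle, hmm⟩ := hPre
  have hlen : Nat.sqrt elementList.length * Nat.sqrt elementList.length = elementList.length := by
    rw [← hmm, Nat.sqrt_eq]
  unfold meshTopology meshTopology_alt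
  simp only [pv_ifapp]
  set L := elementList with hLdef
  set n := Nat.sqrt L.length with hn
  -- B's two edge passes, flattened to one op per append
  have hH : ∀ a : List (List String),
      (List.range (n - 1)).foldl (fun a x => (List.range n).foldl (fun a y =>
        ((a.modify (y * n + x) (fun l => l ++ [L.getD (y * n + x + 1) ""])).modify
          (y * n + x + 1) (fun l => l ++ [L.getD (y * n + x) ""]))) a) a
      = (pvOpsH L n).foldl (fun a p => a.modify p.1 (fun l => l ++ [p.2])) a := by
    intro a
    simp only [pvOpsH, List.foldl_flatMap, List.foldl_cons, List.foldl_nil]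
  have hV : ∀ a : List (List String),
      (List.range (n - 1)).foldl (fun a y => (List.range n).foldl (fun a x =>
        ((a.modify (y * n + x) (fun l => l ++ [L.getD (y * n + x + n) ""])).modify
          (y * n + x + n) (fun l => l ++ [L.getD (y * n + x) ""]))) a) a
      = (pvOpsV L n).foldl (fun a p => a.modify p.1 (fun l => l ++ [p.2])) a := by
    intro a
    simp only [pvOpsV, List.foldl_flatMap, List.foldl_cons, List.foldl_nil]
  rw [hH, hV]
  set A1 := (pvOpsH L n).foldl (fun a p => a.modify p.1 (fun l => l ++ [p.2]))
      (List.replicate L.length []) with hA1def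
  set A2 := (pvOpsV L n).foldl (fun a p => a.modify p.1 (fun l => l ++ [p.2])) A1 with hA2def
  have hlen1 : A1.length = L.length := by
    rw [hA1def, pv_arr_len, List.length_replicate]
  -- the two dict builds insert the same (key, value) pairs in the same order
  congr 1
  apply List.foldl_ext
  intro d x hx
  apply List.foldl_ext
  intro d' y hy
  have hx' : x < n := List.mem_range.mp hx
  have hy' : y < n := List.mem_range.mp hy
  congr 1
  -- the cell's accumulated array entry is exactly A's adjacent list
  have hj : y * n + x < L.length := pv_idx_lt n x y L.length hlen hx' hy'
  rw [hA2def, pv_arr_getD (pvOpsV L n) A1 (y * n + x) (by rw [hlen1]; exact hj)]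
  rw [hA1def, pv_arr_getD (pvOpsH L n) (List.replicate L.length []) (y * n + x)
      (by rw [List.length_replicate]; exact hj)]
  rw [pv_filterH L n x y hx' hy', pv_filterV L n x y hx' hy']
  rw [Nat.mod_eq_of_lt hx', Nat.mod_eq_of_lt hy']
  simp [List.append_assoc]

-- ===== VERDICT (by name: the statement is the Claim_ definition above) =====
theorem meshTopology_spec : Claim_equal_meshTopology := by
  intro L _ hPre
  unfold Spec_meshTopology
  exact pv_main L hPre
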